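-- pv_equiv track=rewrite | github.com/stonemoose/advent_of_code | 2015/15/solver.py | get_cookie_value
-- ===== SOURCE A (Python) =====
-- def get_cookie_value(amount_ingredients, num_props):
--     total = 1
--     for i in range(num_props):
--         curr = 0
--         for amount, ingredient in amount_ingredients:
--             curr += amount * ingredient[i]
--         total *= max(curr, 0)
--
--     cal_count = 0
--     for amount, ingredient in amount_ingredients:
--         cal_count += amount * ingredient[-1]
--     return total, cal_count
-- ===== SOURCE B (Python) =====
-- def get_cookie_value(amount_ingredients, num_props):
--     n = max(num_props, 0)
--     sums = [0] * n
--     cal_count = 0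
--     for amount, ingredient in amount_ingredients:
--         sums = [s + amount * v for s, v in zip(sums, ingredient)]
--         cal_count += amount * ingredient[-1]
--     total = 1
--     for s in sums:
--         total *= max(s, 0)
--     return total, cal_count
-- ===== Notes on version B (the rewrite author's own statement) =====
-- stated objective: alternative
-- what changed: A scans the ingredient list once per property (property-outer nested loops) plus a separate calorie pass; B makes one single pass over the ingredients maintaining a vector of per-property sums together with the calorie sum, then multiplies the clamped sums.
import Mathlib
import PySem

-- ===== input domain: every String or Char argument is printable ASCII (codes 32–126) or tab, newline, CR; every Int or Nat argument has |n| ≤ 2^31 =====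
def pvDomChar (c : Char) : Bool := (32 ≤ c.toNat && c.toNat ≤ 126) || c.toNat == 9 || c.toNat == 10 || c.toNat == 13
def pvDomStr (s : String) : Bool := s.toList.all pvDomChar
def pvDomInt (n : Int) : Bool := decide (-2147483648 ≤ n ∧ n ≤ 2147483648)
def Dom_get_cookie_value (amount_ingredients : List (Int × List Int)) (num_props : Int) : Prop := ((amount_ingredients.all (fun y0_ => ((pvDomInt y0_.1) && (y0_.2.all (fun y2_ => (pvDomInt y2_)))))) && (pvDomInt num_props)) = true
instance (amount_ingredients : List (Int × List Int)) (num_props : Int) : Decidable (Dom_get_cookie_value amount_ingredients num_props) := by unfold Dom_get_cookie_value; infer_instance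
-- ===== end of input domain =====

-- B fuses A's p+1 list traversals into one pass carrying (per-property sums, calorie sum).

-- ===== PORT A =====
-- indexing ingredient[i] / ingredient[-1] ported with PySem.List.pyGetD; in range under Pre_
def get_cookie_value (amount_ingredients : List (Int × List Int)) (num_props : Int) : Int × Int :=
  let total := (PySem.List.pyRange 0 num_props 1).foldl (fun total i =>
      let curr := amount_ingredients.foldl
        (fun curr p => curr + p.1 * PySem.List.pyGetD p.2 i 0) 0
      total * max curr 0) 1
  let cal_count := amount_ingredients.foldl
    (fun c p => c + p.1 * PySem.List.pyGetD p.2 (-1) 0) 0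
  (total, cal_count)

-- ===== PORT B =====
def get_cookie_value_alt (amount_ingredients : List (Int × List Int)) (num_props : Int) : Int × Int :=
  let n := (max num_props 0).toNat
  let init : List Int := List.replicate n 0
  let sc := amount_ingredients.foldl
    (fun (acc : List Int × Int) p =>
      (List.zipWith (fun s v => s + p.1 * v) acc.1 p.2,
       acc.2 + p.1 * PySem.List.pyGetD p.2 (-1) 0))
    (init, 0)
  (sc.1.foldl (fun t s => t * max s 0) 1, sc.2)

-- ===== PRECONDITION & SPEC =====
-- Pre_ excludes exactly the inputs where Python A raises IndexError: an empty
-- ingredient list (ingredient[-1]) or one shorter than num_props (ingredient[i]).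
def Pre_get_cookie_value (amount_ingredients : List (Int × List Int)) (num_props : Int) : Prop :=
  ∀ p ∈ amount_ingredients, p.2 ≠ [] ∧ num_props ≤ (p.2.length : Int)
instance (amount_ingredients : List (Int × List Int)) (num_props : Int) : Decidable (Pre_get_cookie_value amount_ingredients num_props) := by unfold Pre_get_cookie_value; infer_instance

def pvWitness_get_cookie_value : (List (Int × List Int)) × Int := ([(1, [2, 3, 4]), (2, [1, 0, 5])], 2)

def Spec_get_cookie_value (amount_ingredients : List (Int × List Int)) (num_props : Int) (out : Int × Int) : Prop := out = get_cookie_value_alt amount_ingredients num_props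
instance (amount_ingredients : List (Int × List Int)) (num_props : Int) (out : Int × Int) : Decidable (Spec_get_cookie_value amount_ingredients num_props out) := by unfold Spec_get_cookie_value; infer_instance

-- ===== CLAIM (what is proved, stated in full; the proofs are below) =====
def Claim_equal_get_cookie_value : Prop := ∀ (amount_ingredients : List (Int × List Int)) (num_props : Int), Dom_get_cookie_value amount_ingredients num_props → Pre_get_cookie_value amount_ingredients num_props → Spec_get_cookie_value amount_ingredients num_props (get_cookie_value amount_ingredients num_props)

-- ===== LEMMAS AND PROOFS =====

-- per-property sum of amount * ingredient[i]
def pvCsum (ai : List (Int × List Int)) (i : Nat) : Int :=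
  (ai.map (fun p => p.1 * p.2.getD i 0)).sum

theorem pv_zipWith_map_range {k : Nat} (a : Int) (ing : List Int) (f : Nat → Int)
    (h : k ≤ ing.length) :
    List.zipWith (fun s v => s + a * v) ((List.range k).map f) ing
      = (List.range k).map (fun i => f i + a * ing.getD i 0) := by
  apply List.ext_getElem
  · simp [h]
  · intro i h1 h2
    have hik : i < k := by simpa using h2
    have hil : i < ing.length := lt_of_lt_of_le hik h
    simp [List.getD_eq_getElem?_getD, List.getElem?_eq_getElem hil]

theorem pv_sums_fold (ai : List (Int × List Int)) (k : Nat) (f : Nat → Int)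
    (h : ∀ p ∈ ai, k ≤ p.2.length) :
    ai.foldl (fun s (p : Int × List Int) => List.zipWith (fun s v => s + p.1 * v) s p.2)
        ((List.range k).map f)
      = (List.range k).map (fun i => f i + pvCsum ai i) := by
  induction ai generalizing f with
  | nil => simp [pvCsum]
  | cons p ai ih =>
    have hp : k ≤ p.2.length := (h p (List.mem_cons_self ..))
    simp only [List.foldl_cons, pv_zipWith_map_range p.1 p.2 f hp]
    rw [ih _ (fun q hq => h q (List.mem_cons_of_mem _ hq))]
    apply List.map_congr_left
    intro i _
    simp [pvCsum, add_assoc]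

-- the paired fold's second component is the stand-alone calorie fold
theorem pv_cal_fold (ai : List (Int × List Int)) (s : List Int) (c : Int) :
    (ai.foldl (fun (acc : List Int × Int) p =>
        (List.zipWith (fun s v => s + p.1 * v) acc.1 p.2,
         acc.2 + p.1 * PySem.List.pyGetD p.2 (-1) 0)) (s, c)).2
      = ai.foldl (fun c p => c + p.1 * PySem.List.pyGetD p.2 (-1) 0) c := by
  induction ai generalizing s c with
  | nil => rfl
  | cons p ai ih => simp [List.foldl_cons, ih]

-- the paired fold's first component is the stand-alone sums fold
theorem pv_fst_fold (ai : List (Int × List Int)) (s : List Int) (c : Int) :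
    (ai.foldl (fun (acc : List Int × Int) p =>
        (List.zipWith (fun s v => s + p.1 * v) acc.1 p.2,
         acc.2 + p.1 * PySem.List.pyGetD p.2 (-1) 0)) (s, c)).1
      = ai.foldl (fun s (p : Int × List Int) => List.zipWith (fun s v => s + p.1 * v) s p.2) s := by
  induction ai generalizing s c with
  | nil => rfl
  | cons p ai ih => simp [List.foldl_cons, ih]

-- A's inner loop at a natural index equals pvCsum
theorem pv_inner_eq (ai : List (Int × List Int)) (j : Nat) :
    ai.foldl (fun curr p => curr + p.1 * PySem.List.pyGetD p.2 (↑j) 0) 0 = pvCsum ai j := by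
  rw [PySem.List.foldl_add ai (fun p : Int × List Int => p.1 * PySem.List.pyGetD p.2 (↑j) 0) 0]
  simp [pvCsum]

-- ===== VERDICT (by name: the statement is the Claim_ definition above) =====
theorem get_cookie_value_spec : Claim_equal_get_cookie_value := by
  intro ai n _ hpre
  unfold Spec_get_cookie_value
  simp only [get_cookie_value, get_cookie_value_alt]
  have hk : (max n 0).toNat = n.toNat := by omega
  have hlen : ∀ p ∈ ai, n.toNat ≤ p.2.length := by
    intro p hp
    have := (hpre p hp).2
    omega
  -- sums component
  rw [pv_fst_fold, pv_cal_fold, hk]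
  have hrep : (List.replicate n.toNat (0 : Int)) = (List.range n.toNat).map (fun _ => (0 : Int)) := by
    simp [List.map_const']
  rw [hrep, pv_sums_fold ai n.toNat _ hlen]
  -- totals
  have hrange : PySem.List.pyRange 0 n 1 = (List.range n.toNat).map (fun k : Nat => ((k : Int))) := by
    rw [PySem.List.pyRange_one]
    simp
  rw [hrange]
  rw [List.foldl_map, List.foldl_map]
  congr 1
  apply PySem.List.foldl_congr_mem
  intro t j _
  rw [pv_inner_eq]
  simp
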